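-- pv_equiv track=rewrite | github.com/mateusz-z-olszewski/Advent-of-Code-2024 | src/day17.py | part2
-- ===== SOURCE A (Python) =====
-- def part2(expected):
--     """
--     Calculates a list of all numbers which lead to the given sequence when run on the full input problem.
--     """
--     rev = list(reversed(expected))
--     queue = [(0, 0)]
--     out = []
--     while queue:
--         a, i = queue.pop(0)
--         if i == len(expected):
--             out.append(a)
--             continue
--         start = 0 if i else 1 # start from 1 on first iteration.
--         b = rev[i]
--         for x in range(start, 8):
--             new_a = (a << 3) + x
--             if 7 ^ x ^ ((new_a >> (x ^ 1)) % 8) == b: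
--                 queue.append((new_a, i + 1))
--     return out
-- ===== SOURCE B (Python) =====
-- def part2(expected):
--     """
--     Calculates a list of all numbers which lead to the given sequence when run on the full input problem.
--     """
--     rev = list(reversed(expected))
--     def search(a, i):
--         if i == len(rev):
--             return [a]
--         b = rev[i]
--         out = []
--         for x in range(0 if i else 1, 8):
--             new_a = (a << 3) + x
--             if 7 ^ x ^ ((new_a >> (x ^ 1)) % 8) == b:
--                 out += search(new_a, i + 1)
--         return out
--     return search(0, 0)
-- ===== Notes on version B (the rewrite author's own statement) =====
-- stated objective: alternative
-- what changed: A's breadth-first worklist (a Python list used as a FIFO with pop(0)/append under a while loop) is replaced by a recursive depth-first search over digit positions; since every solution sits at the same depth and children are generated in ascending order, the output list is identical.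
import Mathlib
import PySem

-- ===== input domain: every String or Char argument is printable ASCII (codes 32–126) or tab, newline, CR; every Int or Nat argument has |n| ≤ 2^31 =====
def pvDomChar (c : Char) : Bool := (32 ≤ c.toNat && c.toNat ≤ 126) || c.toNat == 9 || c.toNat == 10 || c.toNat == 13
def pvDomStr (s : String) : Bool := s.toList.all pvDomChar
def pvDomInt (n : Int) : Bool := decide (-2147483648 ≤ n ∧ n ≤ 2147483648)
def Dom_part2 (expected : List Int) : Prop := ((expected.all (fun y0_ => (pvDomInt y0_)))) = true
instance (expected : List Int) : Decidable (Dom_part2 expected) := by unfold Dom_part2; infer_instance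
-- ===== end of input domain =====

-- B replaces A's FIFO worklist (while queue: pop(0) / append) by a recursive depth-first
-- search over digit positions; same return value (objective: alternative decomposition).

-- ===== PORT A =====

-- shared test `7 ^ x ^ ((new_a >> (x ^ 1)) % 8) == b` with new_a = (a << 3) + x; the
-- shift amount x ^ 1 is nonnegative for every x range(start, 8) yields, so .toNat is exact.
def pvCond (a x b : Int) : Bool :=
  PySem.Int.bxor 7 (PySem.Int.bxor x
    (PySem.Int.mod (((a <<< (3:Nat)) + x) >>> (PySem.Int.bxor x 1).toNat) 8)) == b

-- queue weight: termination measure for A's while loop (cited by decreasing_by below)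
def pvQW (n : Nat) (q : List (Int × Nat)) : Nat := (q.map (fun e => 9 ^ (n + 1 - e.2))).sum

theorem pvQW_cons (n : Nat) (e : Int × Nat) (q : List (Int × Nat)) :
    pvQW n (e :: q) = 9 ^ (n + 1 - e.2) + pvQW n q := by simp [pvQW]

theorem pvQW_foldl_le (n i : Nat) (a b : Int) (rest : List (Int × Nat)) (xs : List Int) :
    pvQW n (xs.foldl
      (fun q x => if pvCond a x b then q ++ [((a <<< (3:Nat)) + x, i + 1)] else q) rest)
      ≤ pvQW n rest + xs.length * 9 ^ (n - i) := by
  induction xs generalizing rest with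
  | nil => simp
  | cons x xs ih =>
    simp only [List.foldl_cons, List.length_cons]
    refine le_trans (ih _) ?_
    have hmul : (xs.length + 1) * 9 ^ (n - i) = xs.length * 9 ^ (n - i) + 9 ^ (n - i) := by ring
    rw [hmul]
    split
    · have hrw : pvQW n (rest ++ [((a <<< (3:Nat)) + x, i + 1)]) = pvQW n rest + 9 ^ (n - i) := by
        simp [pvQW]
      rw [hrw]
      ring_nf
      exact le_refl _
    · exact Nat.add_le_add_left (Nat.le_add_right _ _) _

-- A's while loop: pop (a, i) from the front; if i == len, record a; otherwise append
-- the surviving children (new_a, i+1) at the back.  (i == len(expected) is compared as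
-- i == rev.length: the two lengths are equal.)
def part2Loop (rev : List Int) : List (Int × Nat) → List Int → List Int
  | [], out => out
  | (a, i) :: rest, out =>
    if i = rev.length then part2Loop rev rest (out ++ [a])
    else
      match hb : PySem.List.pyGet? rev (i : Int) with
      | none => part2Loop rev rest out   -- unreachable: Python's rev[i] would raise IndexError here
      | some b =>
        part2Loop rev
          ((PySem.List.pyRange (if i = 0 then 1 else 0) 8 1).foldl
            (fun q x => if pvCond a x b then q ++ [((a <<< (3:Nat)) + x, i + 1)] else q) rest)
          out
  termination_by q _ => pvQW rev.length q
  decreasing_by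
  · simp [pvQW_cons]
  · simp [pvQW_cons]
  · have hi : i < rev.length := by
      by_contra hge
      simp only [PySem.List.pyGet?_natCast] at hb
      rw [List.getElem?_eq_none (by omega)] at hb
      simp at hb
    have hlen : (PySem.List.pyRange (if i = 0 then 1 else 0) 8 1).length ≤ 8 := by
      split <;> simp [PySem.List.length_pyRange_one]
    have h9 : (9:Nat) ^ (rev.length + 1 - i) = 9 * 9 ^ (rev.length - i) := by
      rw [show rev.length + 1 - i = (rev.length - i) + 1 by omega, pow_succ]; ring
    have hp : 0 < (9:Nat) ^ (rev.length - i) := by positivity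
    have hcons : pvQW rev.length ((a, i) :: rest) = 9 ^ (rev.length + 1 - i) + pvQW rev.length rest :=
      pvQW_cons rev.length (a, i) rest
    have hb1 := pvQW_foldl_le rev.length i a b rest (PySem.List.pyRange (if i = 0 then 1 else 0) 8 1)
    have hb2 := Nat.mul_le_mul_right ((9:Nat) ^ (rev.length - i)) hlen
    simp only [dite_eq_ite]
    omega

def part2 (expected : List Int) : List Int :=
  part2Loop expected.reverse [(0, 0)] []

-- ===== PORT B =====

-- recursive DFS over digit positions (Source B's `search`)
def pvSearch (rev : List Int) (a : Int) (i : Nat) : List Int :=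
  if i = rev.length then [a]
  else
    match h : PySem.List.pyGet? rev (i : Int) with
    | none => []   -- unreachable: Python's rev[i] would raise IndexError here
    | some b =>
      (PySem.List.pyRange (if i = 0 then 1 else 0) 8 1).foldl
        (fun out x =>
          if pvCond a x b then out ++ pvSearch rev ((a <<< (3:Nat)) + x) (i + 1) else out) []
  termination_by rev.length - i
  decreasing_by
    have hi : i < rev.length := by
      by_contra hge
      simp only [PySem.List.pyGet?_natCast] at h
      rw [List.getElem?_eq_none (by omega)] at h
      simp at h
    omega

def part2_alt (expected : List Int) : List Int :=
  pvSearch expected.reverse 0 0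

-- ===== PRECONDITION & SPEC =====
def Spec_part2 (expected : List Int) (out : List Int) : Prop := out = part2_alt expected
instance (expected : List Int) (out : List Int) : Decidable (Spec_part2 expected out) := by unfold Spec_part2; infer_instance

-- ===== CLAIM (what is proved, stated in full; the proofs are below) =====
def Claim_equal_part2 : Prop := ∀ (expected : List Int), Dom_part2 expected → Spec_part2 expected (part2 expected)

-- ===== LEMMAS AND PROOFS =====

-- DFS value of a queue entry, and of a whole queue
def pvRun (rev : List Int) (e : Int × Nat) : List Int := pvSearch rev e.1 e.2
def pvFlat (rev : List Int) (q : List (Int × Nat)) : List Int := q.flatMap (pvRun rev)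

theorem pvSearch_dead (rev : List Int) (a : Int) (i : Nat) (hi : rev.length < i) :
    pvSearch rev a i = [] := by
  rw [pvSearch, if_neg (by omega)]
  have hn : PySem.List.pyGet? rev (i : Int) = none := by
    simp only [PySem.List.pyGet?_natCast]
    exact List.getElem?_eq_none (by omega)
  split
  · rfl
  · rename_i b h; rw [hn] at h; simp at h

theorem pvSearch_some (rev : List Int) (a : Int) (i : Nat) (b : Int)
    (hne : i ≠ rev.length) (h : PySem.List.pyGet? rev (i : Int) = some b) :
    pvSearch rev a i =
      ((PySem.List.pyRange (if i = 0 then 1 else 0) 8 1).filter (fun x => pvCond a x b)).flatMap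
        (fun x => pvSearch rev ((a <<< (3:Nat)) + x) (i + 1)) := by
  rw [pvSearch, if_neg hne]
  split
  · rename_i h'; rw [h'] at h; simp at h
  · rename_i b' h'
    rw [h'] at h
    have hb : b' = b := by injection h
    subst hb
    have hfun : (fun (out : List Int) (x : Int) =>
        if pvCond a x b' then out ++ pvSearch rev ((a <<< (3:Nat)) + x) (i + 1) else out)
        = fun out x => out ++ (if pvCond a x b' then pvSearch rev ((a <<< (3:Nat)) + x) (i + 1) else []) := by
      funext out x; split <;> simp
    rw [hfun, PySem.List.foldl_append_eq_flatMap]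
    simp only [List.nil_append]
    induction (PySem.List.pyRange (if i = 0 then 1 else 0) 8 1) with
    | nil => simp
    | cons y ys ih =>
      by_cases hy : pvCond a y b'
      · simp [hy, ih]
      · simp [hy, ih]

theorem part2Loop_dead (rev : List Int) (q : List (Int × Nat)) (out : List Int)
    (hq : ∀ e ∈ q, rev.length < e.2) : part2Loop rev q out = out := by
  induction q with
  | nil => rw [part2Loop]
  | cons e rest ih =>
    obtain ⟨a, i⟩ := e
    have hi : rev.length < i := hq _ (List.mem_cons_self)
    rw [part2Loop, if_neg (by omega)]
    have hnone : PySem.List.pyGet? rev (i : Int) = none := by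
      simp only [PySem.List.pyGet?_natCast]
      exact List.getElem?_eq_none (by omega)
    split
    · exact ih (fun e he => hq e (List.mem_cons_of_mem _ he))
    · rename_i b h; rw [hnone] at h; simp at h

theorem pvFlat_dead (rev : List Int) (q : List (Int × Nat))
    (hq : ∀ e ∈ q, rev.length < e.2) : pvFlat rev q = [] := by
  simp only [pvFlat, List.flatMap_eq_nil_iff]
  intro l hl
  unfold pvRun
  exact pvSearch_dead _ _ _ (hq l hl)

-- BFS/DFS bridge: for a queue P ++ Q whose front segment sits at level i and whose back
-- segment at level i + 1, A's loop appends first the DFS values of Q, then those of P.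
theorem part2Loop_eq_flat (rev : List Int) (k : Nat) :
    ∀ (i : Nat), rev.length + 1 - i ≤ k →
    ∀ (P : List (Int × Nat)), (∀ e ∈ P, e.2 = i) →
    ∀ (Q : List (Int × Nat)) (out : List Int), (∀ e ∈ Q, e.2 = i + 1) →
      part2Loop rev (P ++ Q) out = out ++ pvFlat rev Q ++ pvFlat rev P := by
  induction k with
  | zero =>
    intro i hk P hP Q out hQ
    have hPd : ∀ e ∈ P ++ Q, rev.length < e.2 := by
      intro e he
      rcases List.mem_append.mp he with h | h
      · rw [hP e h]; omega
      · rw [hQ e h]; omega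
    rw [part2Loop_dead rev _ out hPd,
        pvFlat_dead rev P (fun e he => hPd e (List.mem_append_left _ he)),
        pvFlat_dead rev Q (fun e he => hPd e (List.mem_append_right _ he))]
    simp
  | succ k ih =>
    intro i hk P
    induction P with
    | nil =>
      intro _ Q out hQ
      have := ih (i + 1) (by omega) Q hQ [] out (by simp)
      simpa [pvFlat] using this
    | cons e P' ihP =>
      intro hP Q out hQ
      obtain ⟨a, j⟩ := e
      have hj : j = i := hP _ (List.mem_cons_self)
      subst hj
      have hP' : ∀ e ∈ P', e.2 = j := fun e he => hP e (List.mem_cons_of_mem _ he)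
      by_cases hi : j = rev.length
      · rw [List.cons_append, part2Loop, if_pos hi]
        rw [ihP hP' Q (out ++ [a]) hQ]
        have hQd : pvFlat rev Q = [] :=
          pvFlat_dead rev Q (fun e he => by rw [hQ e he]; omega)
        have hsa : pvSearch rev a j = [a] := by rw [pvSearch, if_pos hi]
        simp only [pvFlat] at hQd
        simp [pvFlat, pvRun, hQd, hsa]
      · rw [List.cons_append, part2Loop, if_neg hi]
        split
        · -- rev[j] out of range: every entry of the queue is dead
          rename_i hnone
          have hj' : rev.length < j := by
            simp only [PySem.List.pyGet?_natCast] at hnone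
            rcases Nat.lt_or_ge j rev.length with h | h
            · rw [List.getElem?_eq_getElem h] at hnone; simp at hnone
            · omega
          rw [part2Loop_dead rev _ out (by
            intro e he
            rcases List.mem_append.mp he with h | h
            · rw [hP' e h]; omega
            · rw [hQ e h]; omega)]
          rw [pvFlat_dead rev Q (fun e he => by rw [hQ e he]; omega)]
          have hPd : pvFlat rev ((a, j) :: P') = [] :=
            pvFlat_dead rev _ (by
              intro e he
              rcases List.mem_cons.mp he with h | h
              · subst h; simpa using hj'
              · rw [hP' e h]; omega)
          simp [hPd]
        · rename_i b h
          rw [PySem.List.foldl_append_if]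
          set C : List (Int × Nat) :=
            ((PySem.List.pyRange (if j = 0 then 1 else 0) 8 1).filter
              (fun x => pvCond a x b)).map (fun x => ((a <<< (3:Nat)) + x, j + 1)) with hC
          have hQC : ∀ e ∈ Q ++ C, e.2 = j + 1 := by
            intro e he
            rcases List.mem_append.mp he with h' | h'
            · exact hQ e h'
            · rw [hC] at h'
              simp only [List.mem_map] at h'
              obtain ⟨x, _, rfl⟩ := h'
              rfl
          rw [List.append_assoc, ihP hP' (Q ++ C) out hQC]
          have hCsearch : pvFlat rev C = pvSearch rev a j := by
            rw [pvSearch_some rev a j b hi h, hC]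
            simp [pvFlat, List.flatMap_map, pvRun]
          simp only [pvFlat] at hCsearch
          simp [pvFlat, pvRun, hCsearch]

-- ===== VERDICT (by name: the statement is the Claim_ definition above) =====
theorem part2_spec : Claim_equal_part2 := by
  intro expected _
  unfold Spec_part2 part2 part2_alt
  have := part2Loop_eq_flat expected.reverse (expected.reverse.length + 1) 0 (by omega)
    [(0, 0)] (by simp) [] [] (by simp)
  simpa [pvFlat, pvRun] using this
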